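-- pv_equiv track=rewrite | github.com/aisaza609/Interoperabilidad_Historias_clinicas | Interoperabilidad/Miscellaneus.py | lineupdater
-- ===== SOURCE A (Python) =====
-- def lineupdater(file):
--     max_length = 0
--     max_len_line = ""
--     for line in file:
--         if len(line) > max_length:
--             max_length = len(line)
--             max_len_line = line
--             index = max_len_line.find("payload")
--             if index != -1:
--                 max_len_line = max_len_line[index:]
--                 max_len_line = max_len_line.replace('\\"', '')
--                 max_len_line = max_len_line.replace('Value', '')
--                 max_len_line = max_len_line.replace('[', '')
--                 max_len_line = max_len_line.replace('\\:', '')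
--                 max_len_line = max_len_line.replace('payload:"', '')
--                 max_len_line = max_len_line.replace('Value', '')
--                 max_len_line = max_len_line.replace('\\', '')
--                 max_len_line = max_len_line.replace(']" \']0m', '')
--                 max_len_line = max_len_line.replace('}', '')
--                 max_len_line = max_len_line.replace('E', 'e')
--                 max_len_line = max_len_line.replace(',', ';')
--     return max_len_line
-- ===== SOURCE B (Python) =====
-- def lineupdater(file):
--     # Sort-based selection: Python's sort is stable, and with reverse=True equal
--     # lengths keep their original order, so ranking[0] is the FIRST longest line.
--     ranking = sorted(file, key=len, reverse=True)
--     best = ranking[0] if ranking else ""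
--     index = best.find("payload")
--     if index == -1:
--         return best
--     s = best[index:]
--     s = s.replace('\\"', '')
--     s = s.replace('Value', '')
--     s = s.replace('[', '')
--     s = s.replace('\\:', '')
--     s = s.replace('payload:"', '')
--     s = s.replace('Value', '')
--     s = s.replace('\\', '')
--     s = s.replace(']" \']0m', '')
--     s = s.replace('}', '')
--     s = s.replace('E', 'e')
--     s = s.replace(',', ';')
--     return s
-- ===== Notes on version B (the rewrite author's own statement) =====
-- stated objective: alternative
-- what changed: B replaces A's running-max loop with interleaved cleaning by a stable reverse sort on length (ranking[0] is the first longest line, '' for an empty file) followed by one application of the find/slice/replace cleanup.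
import Mathlib
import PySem

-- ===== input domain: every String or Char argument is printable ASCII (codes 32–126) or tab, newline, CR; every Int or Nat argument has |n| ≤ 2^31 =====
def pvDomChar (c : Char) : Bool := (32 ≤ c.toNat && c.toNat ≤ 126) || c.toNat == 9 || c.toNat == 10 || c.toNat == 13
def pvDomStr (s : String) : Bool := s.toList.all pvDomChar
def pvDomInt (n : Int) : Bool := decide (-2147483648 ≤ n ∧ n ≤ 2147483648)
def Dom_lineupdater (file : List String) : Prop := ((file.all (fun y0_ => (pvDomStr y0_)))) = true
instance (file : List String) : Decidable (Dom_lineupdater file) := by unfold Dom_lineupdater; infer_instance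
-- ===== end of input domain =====

-- B selects the longest line by a stable reverse sort on length (head = first longest,
-- "" for an empty file) and applies the find/slice/replace cleanup once (objective: alternative).

-- ===== PORT A =====
-- loop body of A, extracted as a named helper so the fold can be reasoned about
def pvStepA (st : Int × String) (line : String) : Int × String :=
  if PySem.Str.len line > st.1 then
    let maxLength := PySem.Str.len line
    let m0 := line
    let index := PySem.Str.find m0 "payload"
    if index ≠ -1 then
      let m1 := PySem.Str.slice m0 (some index) none
      let m2 := PySem.Str.replace m1 "\\\"" ""
      let m3 := PySem.Str.replace m2 "Value" ""
      let m4 := PySem.Str.replace m3 "[" ""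
      let m5 := PySem.Str.replace m4 "\\:" ""
      let m6 := PySem.Str.replace m5 "payload:\"" ""
      let m7 := PySem.Str.replace m6 "Value" ""
      let m8 := PySem.Str.replace m7 "\\" ""
      let m9 := PySem.Str.replace m8 "]\" ']0m" ""
      let m10 := PySem.Str.replace m9 "}" ""
      let m11 := PySem.Str.replace m10 "E" "e"
      let m12 := PySem.Str.replace m11 "," ";"
      (maxLength, m12)
    else (maxLength, m0)
  else st

def lineupdater (file : List String) : String :=
  (file.foldl pvStepA (0, "")).2

-- ===== PORT B =====
-- the cleanup of Source B: slice from 'payload' (no-op when absent), then the replace chain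
def pvClean (best : String) : String :=
  let index := PySem.Str.find best "payload"
  if index = -1 then best
  else
    let s0 := PySem.Str.slice best (some index) none
    let s1 := PySem.Str.replace s0 "\\\"" ""
    let s2 := PySem.Str.replace s1 "Value" ""
    let s3 := PySem.Str.replace s2 "[" ""
    let s4 := PySem.Str.replace s3 "\\:" ""
    let s5 := PySem.Str.replace s4 "payload:\"" ""
    let s6 := PySem.Str.replace s5 "Value" ""
    let s7 := PySem.Str.replace s6 "\\" ""
    let s8 := PySem.Str.replace s7 "]\" ']0m" ""
    let s9 := PySem.Str.replace s8 "}" ""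
    let s10 := PySem.Str.replace s9 "E" "e"
    PySem.Str.replace s10 "," ";"

def lineupdater_alt (file : List String) : String :=
  let ranking := PySem.List.sorted file PySem.Str.len true
  let best := match ranking with
    | [] => ""
    | b :: _ => b
  pvClean best

-- ===== PRECONDITION & SPEC =====
def Spec_lineupdater (file : List String) (out : String) : Prop := out = lineupdater_alt file
instance (file : List String) (out : String) : Decidable (Spec_lineupdater file out) := by unfold Spec_lineupdater; infer_instance

-- ===== CLAIM (what is proved, stated in full; the proofs are below) =====
def Claim_equal_lineupdater : Prop := ∀ (file : List String), Dom_lineupdater file → Spec_lineupdater file (lineupdater file)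

-- ===== LEMMAS AND PROOFS =====

-- the first-strict-max selection that both programs realise
def pvStepB (acc : Option String) (x : String) : Option String :=
  match acc with
  | none => some x
  | some m => if PySem.Str.len m < PySem.Str.len x then some x else some m

def pvLen0 (acc : Option String) : Int :=
  match acc with
  | none => 0
  | some m => PySem.Str.len m

theorem pv_len_nonneg (s : String) : 0 ≤ PySem.Str.len s := by
  simp [PySem.Str.len_eq]

theorem pv_len_zero (s : String) (h : PySem.Str.len s = 0) : s = "" := by
  have hl := PySem.Str.len_eq s
  have h0 : s.toList.length = 0 := by omega
  have hn : s.toList = [] := List.length_eq_zero_iff.mp h0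
  exact String.toList_inj.mp (by simpa using hn)

-- the inline clean of A's update branch equals pvClean
theorem pv_stepA_clean (line : String) (st : Int × String)
    (h : st.1 < PySem.Str.len line) :
    pvStepA st line = (PySem.Str.len line, pvClean line) := by
  have hl := PySem.Str.len_eq line
  have hc : line.toList.length = line.length := String.length_toList
  have h' : st.1 < (line.length : Int) := by omega
  by_cases hf : PySem.Chars.find line.toList "payload".toList = -1 <;>
    · simp at hf
      simp [pvStepA, pvClean, PySem.Str.find, PySem.Str.len_eq, hf, h']

-- A's fold carries exactly (length of first max so far, clean of first max so far)
theorem pv_inv (file : List String) (acc : Option String) :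
    file.foldl pvStepA (pvLen0 acc, pvClean (acc.getD "")) =
      (pvLen0 (file.foldl pvStepB acc), pvClean ((file.foldl pvStepB acc).getD "")) := by
  induction file generalizing acc with
  | nil => rfl
  | cons line rest ih =>
    have step : pvStepA (pvLen0 acc, pvClean (acc.getD "")) line =
        (pvLen0 (pvStepB acc line), pvClean ((pvStepB acc line).getD "")) := by
      cases acc with
      | none =>
        by_cases h : (0 : Int) < PySem.Str.len line
        · rw [pv_stepA_clean line _ (by simpa [pvLen0] using h)]
          simp [pvStepB, pvLen0]
        · have h0 : PySem.Str.len line = 0 :=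
            le_antisymm (not_lt.mp h) (pv_len_nonneg line)
          have he : line = "" := pv_len_zero line h0
          subst he
          decide
      | some m =>
        have hm := PySem.Str.len_eq m
        have hl := PySem.Str.len_eq line
        have hcm : m.toList.length = m.length := String.length_toList
        have hcl : line.toList.length = line.length := String.length_toList
        by_cases h : PySem.Str.len m < PySem.Str.len line
        · rw [pv_stepA_clean line _ (by simpa [pvLen0] using h)]
          have h2 : m.length < line.length := by omega
          simp [pvStepB, pvLen0, h2]
        · have h2 : ¬ m.length < line.length := by omega
          simp [pvStepA, pvStepB, pvLen0, PySem.Str.len_eq, h2]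
    rw [List.foldl_cons, List.foldl_cons, step]
    exact ih (pvStepB acc line)

-- the head of a stable reverse insertion sort evolves like the first-strict-max fold
theorem pv_head_insertBy {α : Type} (before : α → α → Bool) (x : α) (ys : List α) :
    (PySem.List.insertBy before x ys).head? =
      (match ys.head? with
        | none => some x
        | some y => if before x y then some x else some y) := by
  cases ys with
  | nil => rfl
  | cons y t =>
    by_cases h : before x y = true <;> simp [PySem.List.insertBy, h]

theorem pv_head_foldl_insertBy {α : Type} (before : α → α → Bool)
    (xs : List α) (acc : List α) :
    (xs.foldl (fun a x => PySem.List.insertBy before x a) acc).head? =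
      xs.foldl
        (fun o x => match o with
          | none => some x
          | some y => if before x y then some x else some y) acc.head? := by
  induction xs generalizing acc with
  | nil => rfl
  | cons x rest ih =>
    rw [List.foldl_cons, List.foldl_cons, ih, pv_head_insertBy]

-- head of sorted(file, key=len, reverse=True) = the first-strict-max fold
theorem pv_sorted_head (file : List String) :
    (PySem.List.sorted file PySem.Str.len true).head? = file.foldl pvStepB none := by
  rw [PySem.List.sorted_rev_eq_foldl_insertBy, pv_head_foldl_insertBy]
  congr 1
  funext o x
  cases o with
  | none => rfl
  | some m => by_cases h : PySem.Str.len m < PySem.Str.len x <;> simp [pvStepB, h]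

-- ===== VERDICT (by name: the statement is the Claim_ definition above) =====
theorem lineupdater_spec : Claim_equal_lineupdater := by
  intro file _
  unfold Spec_lineupdater lineupdater lineupdater_alt
  have e : ((0 : Int), "") = (pvLen0 none, pvClean (Option.getD none "")) := by decide
  rw [e, pv_inv file none, ← pv_sorted_head]
  cases h : (PySem.List.sorted file PySem.Str.len true) <;> simp [h]
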